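-- pv_equiv track=rewrite | github.com/ohana-garden/Vessels | shoghi/applications/content/content_generation.py | _simplify_language
-- ===== SOURCE A (Python) =====
-- def _simplify_language(text: str) -> str:
--     """Simplify language for accessibility"""
--
--     # Replace complex words with simple ones
--     simplifications = {
--         'utilize': 'use',
--         'implement': 'start',
--         'facilitate': 'help',
--         'coordinate': 'organize',
--         'assessment': 'check',
--         'documentation': 'notes'
--     }
--
--     for complex, simple in simplifications.items():
--         text = text.replace(complex, simple)
--
--     return text
-- ===== SOURCE B (Python) =====
-- def _simplify_language(text: str) -> str:
--     """Simplify language for accessibility"""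
--
--     # Replace complex words with simple ones
--     simplifications = {
--         'utilize': 'use',
--         'implement': 'start',
--         'facilitate': 'help',
--         'coordinate': 'organize',
--         'assessment': 'check',
--         'documentation': 'notes'
--     }
--
--     # Single left-to-right scan: at each position try the keys in dict order;
--     # on a match emit the simple word and jump past the complex one.
--     keys = list(simplifications)
--     out = []
--     i = 0
--     n = len(text)
--     while i < n:
--         for k in keys:
--             if text.startswith(k, i):
--                 out.append(simplifications[k])
--                 i += len(k)
--                 break
--         else:
--             out.append(text[i])
--             i += 1
--     return ''.join(out)
-- ===== Notes on version B (the rewrite author's own statement) =====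
-- stated objective: alternative
-- what changed: B replaces all six words in ONE left-to-right scan of the text (try each key at the current position, emit its replacement and jump past it, else copy the character), instead of A's six sequential full-text str.replace passes; equal because no key overlaps another and no replacement value re-creates a key.
import Mathlib
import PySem

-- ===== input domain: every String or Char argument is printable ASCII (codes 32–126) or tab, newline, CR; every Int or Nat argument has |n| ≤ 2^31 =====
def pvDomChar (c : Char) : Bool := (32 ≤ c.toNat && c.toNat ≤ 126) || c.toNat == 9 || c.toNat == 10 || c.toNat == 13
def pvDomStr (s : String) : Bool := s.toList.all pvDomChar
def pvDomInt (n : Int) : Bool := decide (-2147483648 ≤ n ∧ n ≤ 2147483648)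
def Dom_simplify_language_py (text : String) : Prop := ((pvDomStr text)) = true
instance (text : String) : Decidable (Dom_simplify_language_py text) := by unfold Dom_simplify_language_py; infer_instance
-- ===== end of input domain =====

-- B replaces all six words in one left-to-right scan (keys tried in dict order at each
-- position) instead of A's six sequential full-text str.replace passes; same result.


-- ===== PORT A =====
-- the dict literal of A, in insertion order
def pvSimplifications : PySem.Dict String String :=
  PySem.Dict.ofList [("utilize", "use"), ("implement", "start"), ("facilitate", "help"),
    ("coordinate", "organize"), ("assessment", "check"), ("documentation", "notes")]

-- for complex, simple in simplifications.items(): text = text.replace(complex, simple)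
def simplify_language_py (text : String) : String :=
  pvSimplifications.items.foldl (fun t kv => PySem.Str.replace t kv.1 kv.2) text

-- ===== PORT B =====
-- B's (key, simplifications[key]) pairs in dict order, as char lists
def pvPairs : List (List Char × List Char) :=
  [("utilize".toList, "use".toList), ("implement".toList, "start".toList),
   ("facilitate".toList, "help".toList), ("coordinate".toList, "organize".toList),
   ("assessment".toList, "check".toList), ("documentation".toList, "notes".toList)]

-- B's while-loop over positions, as recursion on the remaining suffix: at each position the
-- first key of pvPairs that startswith-matches is replaced and skipped, else the character
-- is copied (exact port of the while/for/else loop in Source B)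
def pvScan : List Char → List Char
  | [] => []
  | c :: t =>
    match pvPairs.find? (fun kv => kv.1.isPrefixOf (c :: t)) with
    | some kv => kv.2 ++ pvScan (List.drop (kv.1.length - 1) t)
    | none => c :: pvScan t
termination_by s => s.length
decreasing_by all_goals (simp only [List.length_drop, List.length_cons]; omega)

def simplify_language_py_alt (text : String) : String :=
  String.ofList (pvScan text.toList)

-- ===== PRECONDITION & SPEC =====
def Spec_simplify_language_py (text : String) (out : String) : Prop := out = simplify_language_py_alt text
instance (text : String) (out : String) : Decidable (Spec_simplify_language_py text out) := by unfold Spec_simplify_language_py; infer_instance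

-- ===== CLAIM (what is proved, stated in full; the proofs are below) =====
def Claim_equal_simplify_language_py : Prop := ∀ (text : String), Dom_simplify_language_py text → Spec_simplify_language_py text (simplify_language_py text)

-- ===== LEMMAS AND PROOFS =====

-- structural (well-founded) version of CPython's str.replace left-to-right scan
def pvRep (old new : List Char) : List Char → List Char
  | [] => []
  | c :: t =>
    if old.isPrefixOf (c :: t) then new ++ pvRep old new (List.drop (old.length - 1) t)
    else c :: pvRep old new t
termination_by s => s.length
decreasing_by all_goals (simp only [List.length_drop, List.length_cons]; omega)

lemma pvGo_eq (old new : List Char) (hold : old ≠ []) :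
    ∀ (fuel : Nat) (l acc : List Char), l.length ≤ fuel →
      PySem.Chars.replace.go old new fuel l acc = acc.reverse ++ pvRep old new l := by
  intro fuel
  induction fuel with
  | zero =>
      intro l acc hl
      have : l = [] := List.eq_nil_of_length_eq_zero (Nat.le_zero.mp hl)
      subst this
      rw [PySem.Chars.replace.go.eq_def]
      simp [pvRep]
  | succ fuel ih =>
      intro l acc hl
      cases l with
      | nil => rw [PySem.Chars.replace.go.eq_def]; simp [pvRep]
      | cons c t =>
          rw [PySem.Chars.replace.go.eq_def]
          simp only []
          by_cases hp : old.isPrefixOf (c :: t) = true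
          · rw [if_pos hp]
            have hol : 0 < old.length := List.length_pos_of_ne_nil hold
            have hlen : (List.drop old.length (c :: t)).length ≤ fuel := by
              simp only [List.length_drop, List.length_cons] at hl ⊢
              omega
            rw [ih _ _ hlen]
            obtain ⟨d, o', rfl⟩ : ∃ d o', old = d :: o' := by
              cases old with
              | nil => exact absurd rfl hold
              | cons d o' => exact ⟨d, o', rfl⟩
            simp [pvRep, hp]
          · rw [if_neg hp]
            have hlen : t.length ≤ fuel := by simp at hl; omega
            rw [ih _ _ hlen]
            simp [pvRep, hp]

lemma pvReplace_eq (s old new : List Char) (hold : old ≠ []) :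
    PySem.Chars.replace s old new = pvRep old new s := by
  unfold PySem.Chars.replace
  rw [if_neg (by simp [hold]), pvGo_eq old new hold s.length s [] le_rfl]
  simp

lemma pvRep_nil (old new : List Char) : pvRep old new [] = [] := by simp [pvRep]

lemma pvRep_skip (old new : List Char) (c : Char) (t : List Char)
    (h : ¬ old <+: (c :: t)) : pvRep old new (c :: t) = c :: pvRep old new t := by
  rw [pvRep, if_neg (by simpa [List.isPrefixOf_iff_prefix] using h)]

lemma pvRep_match (old new z : List Char) (hold : old ≠ []) :
    pvRep old new (old ++ z) = new ++ pvRep old new z := by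
  obtain ⟨d, o', rfl⟩ : ∃ d o', old = d :: o' := by
    cases old with
    | nil => exact absurd rfl hold
    | cons d o' => exact ⟨d, o', rfl⟩
  rw [List.cons_append, pvRep,
    if_pos (by simp [List.isPrefixOf_iff_prefix])]
  simp

-- a prefix of an append either lies in the left part or extends past it
lemma pvPrefAppend {w a y : List Char} (h : w <+: a ++ y) : w <+: a ∨ a <+: w := by
  rcases le_or_gt w.length a.length with hl | hl
  · exact Or.inl (List.prefix_of_prefix_length_le h (List.prefix_append a y) hl)
  · exact Or.inr (List.prefix_of_prefix_length_le (List.prefix_append a y) h (le_of_lt hl))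

-- replace passes over x untouched when old can match at no position of x
lemma pvRep_passthru (old new : List Char) :
    ∀ (x y : List Char),
      (∀ p, p < x.length → ¬ old <+: x.drop p ∧ ¬ x.drop p <+: old) →
      pvRep old new (x ++ y) = x ++ pvRep old new y := by
  intro x
  induction x with
  | nil => simp
  | cons c x' ih =>
      intro y hx
      have h0 := hx 0 (by simp)
      simp only [List.drop_zero] at h0
      have hne : ¬ old <+: c :: (x' ++ y) := by
        intro h
        rcases pvPrefAppend (a := c :: x') (by simpa using h) with h' | h'
        · exact h0.1 h'
        · exact h0.2 h'
      rw [List.cons_append, pvRep_skip _ _ _ _ hne,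
        ih y (fun p hp => by simpa using hx (p + 1) (by simp; omega))]
      simp

-- no suffix of K can begin to match inside an inserted copy of new, so a match of a
-- suffix of K in the output of replace pulls back to a match in its input
lemma pvRep_pullback (old new K : List Char)
    (hc : ∀ p, p < K.length → ¬ K.drop p <+: new ∧ ¬ new <+: K.drop p) :
    ∀ (s : List Char) (p : Nat), K.drop p <+: pvRep old new s → K.drop p <+: s := by
  intro s
  induction hn : s.length using Nat.strong_induction_on generalizing s with
  | _ n ihn =>
  intro p hpre
  rcases Nat.lt_or_ge p K.length with hp | hp
  · cases s with
    | nil => simpa [pvRep_nil] using hpre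
    | cons c t =>
        by_cases hm : old.isPrefixOf (c :: t) = true
        · rw [pvRep, if_pos hm] at hpre
          rcases pvPrefAppend hpre with h' | h'
          · exact absurd h' (hc p hp).1
          · exact absurd h' (hc p hp).2
        · rw [pvRep, if_neg hm] at hpre
          cases hw : K.drop p with
          | nil => simp
          | cons d w' =>
              rw [hw, List.cons_prefix_cons] at hpre
              have hw' : K.drop (p + 1) = w' := by
                rw [← List.tail_drop, hw, List.tail_cons]
              have h2 : w' <+: t := by
                have := ihn t.length (by subst hn; simp) t rfl (p + 1)
                  (by rw [hw']; exact hpre.2)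
                rwa [hw'] at this
              exact List.cons_prefix_cons.mpr ⟨hpre.1, h2⟩
  · have : K.drop p = [] := List.drop_eq_nil_of_le hp
    simp [this]

-- A's six passes as nested pvRep (on char lists)
def pvF (s : List Char) : List Char :=
  pvRep "documentation".toList "notes".toList (pvRep "assessment".toList "check".toList (pvRep "coordinate".toList "organize".toList (pvRep "facilitate".toList "help".toList (pvRep "implement".toList "start".toList (pvRep "utilize".toList "use".toList s)))))

lemma pvA_toList (text : String) : (simplify_language_py text).toList = pvF text.toList := by
  have h : pvSimplifications.items = [("utilize", "use"), ("implement", "start"),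
      ("facilitate", "help"), ("coordinate", "organize"), ("assessment", "check"),
      ("documentation", "notes")] := by decide
  simp only [simplify_language_py]
  rw [h]
  simp only [List.foldl, PySem.Str.replace, String.toList_ofList]
  rw [pvReplace_eq _ "utilize".toList _ (by decide)]
  rw [pvReplace_eq _ "implement".toList _ (by decide)]
  rw [pvReplace_eq _ "facilitate".toList _ (by decide)]
  rw [pvReplace_eq _ "coordinate".toList _ (by decide)]
  rw [pvReplace_eq _ "assessment".toList _ (by decide)]
  rw [pvReplace_eq _ "documentation".toList _ (by decide)]
  rfl

lemma pvScan_match1 (z : List Char) :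
    pvScan ("utilize".toList ++ z) = "use".toList ++ pvScan z := by
  rw [pvScan.eq_def]
  simp [pvPairs, List.isPrefixOf]

lemma pvScan_match2 (z : List Char) :
    pvScan ("implement".toList ++ z) = "start".toList ++ pvScan z := by
  rw [pvScan.eq_def]
  simp [pvPairs, List.isPrefixOf]

lemma pvScan_match3 (z : List Char) :
    pvScan ("facilitate".toList ++ z) = "help".toList ++ pvScan z := by
  rw [pvScan.eq_def]
  simp [pvPairs, List.isPrefixOf]

lemma pvScan_match4 (z : List Char) :
    pvScan ("coordinate".toList ++ z) = "organize".toList ++ pvScan z := by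
  rw [pvScan.eq_def]
  simp [pvPairs, List.isPrefixOf]

lemma pvScan_match5 (z : List Char) :
    pvScan ("assessment".toList ++ z) = "check".toList ++ pvScan z := by
  rw [pvScan.eq_def]
  simp [pvPairs, List.isPrefixOf]

lemma pvScan_match6 (z : List Char) :
    pvScan ("documentation".toList ++ z) = "notes".toList ++ pvScan z := by
  rw [pvScan.eq_def]
  simp [pvPairs, List.isPrefixOf]

lemma pvScan_skip (c : Char) (t : List Char)
    (h : ∀ kv ∈ pvPairs, ¬ kv.1 <+: (c :: t)) : pvScan (c :: t) = c :: pvScan t := by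
  rw [pvScan.eq_def]
  have hf : pvPairs.find? (fun kv => kv.1.isPrefixOf (c :: t)) = none := by
    rw [List.find?_eq_none]
    intro kv hkv
    simpa [List.isPrefixOf_iff_prefix] using h kv hkv
  simp [hf]

lemma pvF_cons1 (z : List Char) :
    pvF ("utilize".toList ++ z) = "use".toList ++ pvF z := by
  unfold pvF
  rw [pvRep_match "utilize".toList "use".toList _ (by decide)]
  rw [pvRep_passthru "implement".toList "start".toList "use".toList _ (by decide)]
  rw [pvRep_passthru "facilitate".toList "help".toList "use".toList _ (by decide)]
  rw [pvRep_passthru "coordinate".toList "organize".toList "use".toList _ (by decide)]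
  rw [pvRep_passthru "assessment".toList "check".toList "use".toList _ (by decide)]
  rw [pvRep_passthru "documentation".toList "notes".toList "use".toList _ (by decide)]

lemma pvF_cons2 (z : List Char) :
    pvF ("implement".toList ++ z) = "start".toList ++ pvF z := by
  unfold pvF
  rw [pvRep_passthru "utilize".toList "use".toList "implement".toList _ (by decide)]
  rw [pvRep_match "implement".toList "start".toList _ (by decide)]
  rw [pvRep_passthru "facilitate".toList "help".toList "start".toList _ (by decide)]
  rw [pvRep_passthru "coordinate".toList "organize".toList "start".toList _ (by decide)]
  rw [pvRep_passthru "assessment".toList "check".toList "start".toList _ (by decide)]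
  rw [pvRep_passthru "documentation".toList "notes".toList "start".toList _ (by decide)]

lemma pvF_cons3 (z : List Char) :
    pvF ("facilitate".toList ++ z) = "help".toList ++ pvF z := by
  unfold pvF
  rw [pvRep_passthru "utilize".toList "use".toList "facilitate".toList _ (by decide)]
  rw [pvRep_passthru "implement".toList "start".toList "facilitate".toList _ (by decide)]
  rw [pvRep_match "facilitate".toList "help".toList _ (by decide)]
  rw [pvRep_passthru "coordinate".toList "organize".toList "help".toList _ (by decide)]
  rw [pvRep_passthru "assessment".toList "check".toList "help".toList _ (by decide)]
  rw [pvRep_passthru "documentation".toList "notes".toList "help".toList _ (by decide)]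

lemma pvF_cons4 (z : List Char) :
    pvF ("coordinate".toList ++ z) = "organize".toList ++ pvF z := by
  unfold pvF
  rw [pvRep_passthru "utilize".toList "use".toList "coordinate".toList _ (by decide)]
  rw [pvRep_passthru "implement".toList "start".toList "coordinate".toList _ (by decide)]
  rw [pvRep_passthru "facilitate".toList "help".toList "coordinate".toList _ (by decide)]
  rw [pvRep_match "coordinate".toList "organize".toList _ (by decide)]
  rw [pvRep_passthru "assessment".toList "check".toList "organize".toList _ (by decide)]
  rw [pvRep_passthru "documentation".toList "notes".toList "organize".toList _ (by decide)]

lemma pvF_cons5 (z : List Char) :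
    pvF ("assessment".toList ++ z) = "check".toList ++ pvF z := by
  unfold pvF
  rw [pvRep_passthru "utilize".toList "use".toList "assessment".toList _ (by decide)]
  rw [pvRep_passthru "implement".toList "start".toList "assessment".toList _ (by decide)]
  rw [pvRep_passthru "facilitate".toList "help".toList "assessment".toList _ (by decide)]
  rw [pvRep_passthru "coordinate".toList "organize".toList "assessment".toList _ (by decide)]
  rw [pvRep_match "assessment".toList "check".toList _ (by decide)]
  rw [pvRep_passthru "documentation".toList "notes".toList "check".toList _ (by decide)]

lemma pvF_cons6 (z : List Char) :
    pvF ("documentation".toList ++ z) = "notes".toList ++ pvF z := by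
  unfold pvF
  rw [pvRep_passthru "utilize".toList "use".toList "documentation".toList _ (by decide)]
  rw [pvRep_passthru "implement".toList "start".toList "documentation".toList _ (by decide)]
  rw [pvRep_passthru "facilitate".toList "help".toList "documentation".toList _ (by decide)]
  rw [pvRep_passthru "coordinate".toList "organize".toList "documentation".toList _ (by decide)]
  rw [pvRep_passthru "assessment".toList "check".toList "documentation".toList _ (by decide)]
  rw [pvRep_match "documentation".toList "notes".toList _ (by decide)]

lemma pvF_skip (c : Char) (t : List Char)
    (h1 : ¬ "utilize".toList <+: (c :: t))
    (h2 : ¬ "implement".toList <+: (c :: t))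
    (h3 : ¬ "facilitate".toList <+: (c :: t))
    (h4 : ¬ "coordinate".toList <+: (c :: t))
    (h5 : ¬ "assessment".toList <+: (c :: t))
    (h6 : ¬ "documentation".toList <+: (c :: t)) :
    pvF (c :: t) = c :: pvF t := by
  unfold pvF
  have e1 := pvRep_skip "utilize".toList "use".toList c t h1
  rw [e1]
  have n2 : ¬ "implement".toList <+: c :: (pvRep "utilize".toList "use".toList t) := by
    rw [← e1]
    intro hcon
    have s1 := pvRep_pullback "utilize".toList "use".toList "implement".toList (by decide) _ 0 (by simpa using hcon)
    exact h2 (by simpa using s1)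
  have e2 := pvRep_skip "implement".toList "start".toList c _ n2
  rw [e2]
  have n3 : ¬ "facilitate".toList <+: c :: (pvRep "implement".toList "start".toList (pvRep "utilize".toList "use".toList t)) := by
    rw [← e2, ← e1]
    intro hcon
    have s2 := pvRep_pullback "implement".toList "start".toList "facilitate".toList (by decide) _ 0 (by simpa using hcon)
    have s1 := pvRep_pullback "utilize".toList "use".toList "facilitate".toList (by decide) _ 0 (by simpa using s2)
    exact h3 (by simpa using s1)
  have e3 := pvRep_skip "facilitate".toList "help".toList c _ n3
  rw [e3]
  have n4 : ¬ "coordinate".toList <+: c :: (pvRep "facilitate".toList "help".toList (pvRep "implement".toList "start".toList (pvRep "utilize".toList "use".toList t))) := by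
    rw [← e3, ← e2, ← e1]
    intro hcon
    have s3 := pvRep_pullback "facilitate".toList "help".toList "coordinate".toList (by decide) _ 0 (by simpa using hcon)
    have s2 := pvRep_pullback "implement".toList "start".toList "coordinate".toList (by decide) _ 0 (by simpa using s3)
    have s1 := pvRep_pullback "utilize".toList "use".toList "coordinate".toList (by decide) _ 0 (by simpa using s2)
    exact h4 (by simpa using s1)
  have e4 := pvRep_skip "coordinate".toList "organize".toList c _ n4
  rw [e4]
  have n5 : ¬ "assessment".toList <+: c :: (pvRep "coordinate".toList "organize".toList (pvRep "facilitate".toList "help".toList (pvRep "implement".toList "start".toList (pvRep "utilize".toList "use".toList t)))) := by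
    rw [← e4, ← e3, ← e2, ← e1]
    intro hcon
    have s4 := pvRep_pullback "coordinate".toList "organize".toList "assessment".toList (by decide) _ 0 (by simpa using hcon)
    have s3 := pvRep_pullback "facilitate".toList "help".toList "assessment".toList (by decide) _ 0 (by simpa using s4)
    have s2 := pvRep_pullback "implement".toList "start".toList "assessment".toList (by decide) _ 0 (by simpa using s3)
    have s1 := pvRep_pullback "utilize".toList "use".toList "assessment".toList (by decide) _ 0 (by simpa using s2)
    exact h5 (by simpa using s1)
  have e5 := pvRep_skip "assessment".toList "check".toList c _ n5
  rw [e5]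
  have n6 : ¬ "documentation".toList <+: c :: (pvRep "assessment".toList "check".toList (pvRep "coordinate".toList "organize".toList (pvRep "facilitate".toList "help".toList (pvRep "implement".toList "start".toList (pvRep "utilize".toList "use".toList t))))) := by
    rw [← e5, ← e4, ← e3, ← e2, ← e1]
    intro hcon
    have s5 := pvRep_pullback "assessment".toList "check".toList "documentation".toList (by decide) _ 0 (by simpa using hcon)
    have s4 := pvRep_pullback "coordinate".toList "organize".toList "documentation".toList (by decide) _ 0 (by simpa using s5)
    have s3 := pvRep_pullback "facilitate".toList "help".toList "documentation".toList (by decide) _ 0 (by simpa using s4)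
    have s2 := pvRep_pullback "implement".toList "start".toList "documentation".toList (by decide) _ 0 (by simpa using s3)
    have s1 := pvRep_pullback "utilize".toList "use".toList "documentation".toList (by decide) _ 0 (by simpa using s2)
    exact h6 (by simpa using s1)
  have e6 := pvRep_skip "documentation".toList "notes".toList c _ n6
  rw [e6]

lemma pvMain : ∀ s : List Char, pvF s = pvScan s := by
  intro s
  induction hn : s.length using Nat.strong_induction_on generalizing s with
  | _ n ihn =>
  by_cases h1 : "utilize".toList <+: s
  · obtain ⟨z, rfl⟩ := h1
    rw [pvF_cons1, pvScan_match1]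
    congr 1
    exact ihn z.length (by rw [← hn]; simp; omega) z rfl
  by_cases h2 : "implement".toList <+: s
  · obtain ⟨z, rfl⟩ := h2
    rw [pvF_cons2, pvScan_match2]
    congr 1
    exact ihn z.length (by rw [← hn]; simp; omega) z rfl
  by_cases h3 : "facilitate".toList <+: s
  · obtain ⟨z, rfl⟩ := h3
    rw [pvF_cons3, pvScan_match3]
    congr 1
    exact ihn z.length (by rw [← hn]; simp; omega) z rfl
  by_cases h4 : "coordinate".toList <+: s
  · obtain ⟨z, rfl⟩ := h4
    rw [pvF_cons4, pvScan_match4]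
    congr 1
    exact ihn z.length (by rw [← hn]; simp; omega) z rfl
  by_cases h5 : "assessment".toList <+: s
  · obtain ⟨z, rfl⟩ := h5
    rw [pvF_cons5, pvScan_match5]
    congr 1
    exact ihn z.length (by rw [← hn]; simp; omega) z rfl
  by_cases h6 : "documentation".toList <+: s
  · obtain ⟨z, rfl⟩ := h6
    rw [pvF_cons6, pvScan_match6]
    congr 1
    exact ihn z.length (by rw [← hn]; simp; omega) z rfl
  cases s with
  | nil =>
      rw [pvScan.eq_def]
      simp [pvF, pvRep_nil]
  | cons c t =>
      have hall : ∀ kv ∈ pvPairs, ¬ kv.1 <+: (c :: t) := by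
        intro kv hkv
        simp only [pvPairs, List.mem_cons, List.not_mem_nil, or_false] at hkv
        rcases hkv with rfl | rfl | rfl | rfl | rfl | rfl
        · exact h1
        · exact h2
        · exact h3
        · exact h4
        · exact h5
        · exact h6
      rw [pvF_skip c t h1 h2 h3 h4 h5 h6, pvScan_skip c t hall]
      congr 1
      exact ihn t.length (by rw [← hn]; simp) t rfl

-- ===== VERDICT (by name: the statement is the Claim_ definition above) =====
theorem simplify_language_py_spec : Claim_equal_simplify_language_py := by
  intro text _
  unfold Spec_simplify_language_py
  rw [← String.toList_inj, pvA_toList, pvMain, simplify_language_py_alt, String.toList_ofList]
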